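-- pv_equiv track=rewrite | github.com/pypi-data/pypi-mirror-27 | packages/mhelper/mhelper-1.0.1.31.tar.gz/mhelper-1.0.1.31/mhelper/array_helper.py | lagged_iterate
-- ===== SOURCE A (Python) =====
-- from typing import List, Optional, Iterator, Tuple, Dict, Iterable, Union, TypeVar, Callable, cast
--
-- T = TypeVar( "T" )
--
-- def lagged_iterate( sequence: Iterable[Optional[T]] ) -> Iterator[Tuple[Optional[T], Optional[T]]]:
--     """
--     Iterates over all adjacent pairs in the sequence, (0,1),(1,2),(2,3),(...,...),(n-1,n)
--     """
--     has_any = False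
--     previous = None
--
--     for current in sequence:
--         if has_any:
--             yield previous, current
--
--         has_any = True
--         previous = current
-- ===== SOURCE B (Python) =====
-- def lagged_iterate(sequence):
--     """Yield adjacent pairs by materializing the input and indexing it randomly."""
--     seq = list(sequence)
--     for i in range(1, len(seq)):
--         yield seq[i - 1], seq[i]
-- ===== Notes on version B (the rewrite author's own statement) =====
-- stated objective: alternative
-- what changed: Replaces A's streaming has_any/previous state machine with a staged approach: materialize the input into a list, then yield pairs by random-access indexing seq[i-1], seq[i] over range(1, len(seq)).
import Mathlib
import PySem

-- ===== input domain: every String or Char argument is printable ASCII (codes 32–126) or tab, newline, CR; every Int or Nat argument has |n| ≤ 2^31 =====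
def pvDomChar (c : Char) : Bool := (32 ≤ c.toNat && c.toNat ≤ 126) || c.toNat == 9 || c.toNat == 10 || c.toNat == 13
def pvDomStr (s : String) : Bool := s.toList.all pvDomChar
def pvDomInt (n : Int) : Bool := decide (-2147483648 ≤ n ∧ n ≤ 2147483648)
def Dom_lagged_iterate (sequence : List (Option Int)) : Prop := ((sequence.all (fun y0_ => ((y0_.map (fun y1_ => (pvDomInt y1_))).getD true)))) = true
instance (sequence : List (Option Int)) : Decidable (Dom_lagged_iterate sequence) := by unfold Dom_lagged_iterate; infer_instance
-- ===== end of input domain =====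

-- B replaces A's streaming has_any/previous state machine with a staged, random-access
-- formulation: materialize the sequence, then index pairs seq[i-1], seq[i] over range(1, len).

-- ===== PORT A =====
-- the generator loop: state (has_any, previous), yielding (previous, current) once has_any
def lagged_iterate_go (rest : List (Option Int)) (hasAny : Bool) (previous : Option Int) :
    List (Option Int × Option Int) :=
  match rest with
  | [] => []
  | current :: rest' =>
      (if hasAny then [(previous, current)] else []) ++ lagged_iterate_go rest' true current

def lagged_iterate (sequence : List (Option Int)) : List (Option Int × Option Int) :=
  lagged_iterate_go sequence false none

-- ===== PORT B =====
-- seq = list(sequence); for i in range(1, len(seq)): yield seq[i-1], seq[i]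
-- (indices are always in range, so pyGetD with default none is exact for seq[i])
def lagged_iterate_alt (sequence : List (Option Int)) : List (Option Int × Option Int) :=
  (PySem.List.pyRange 1 (sequence.length : Int) 1).map
    (fun i => (PySem.List.pyGetD sequence (i - 1) none, PySem.List.pyGetD sequence i none))

-- ===== PRECONDITION & SPEC =====
def Spec_lagged_iterate (sequence : List (Option Int)) (out : List (Option Int × Option Int)) : Prop := out = lagged_iterate_alt sequence
instance (sequence : List (Option Int)) (out : List (Option Int × Option Int)) : Decidable (Spec_lagged_iterate sequence out) := by unfold Spec_lagged_iterate; infer_instance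

-- ===== CLAIM (what is proved, stated in full; the proofs are below) =====
def Claim_equal_lagged_iterate : Prop := ∀ (sequence : List (Option Int)), Dom_lagged_iterate sequence → Spec_lagged_iterate sequence (lagged_iterate sequence)

-- ===== LEMMAS AND PROOFS =====
-- once has_any is true, A's loop produces exactly the zip of the list with its tail
theorem lagged_iterate_go_true (rest : List (Option Int)) :
    ∀ c, lagged_iterate_go rest true c = List.zip (c :: rest) rest := by
  induction rest with
  | nil => intro c; rfl
  | cons x xs ih => intro c; simp [lagged_iterate_go, ih x, List.zip]

-- B's indexed map also equals that zip
theorem lagged_iterate_alt_eq_zip (sequence : List (Option Int)) :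
    lagged_iterate_alt sequence = List.zip sequence sequence.tail := by
  unfold lagged_iterate_alt
  apply List.ext_getElem
  · simp [PySem.List.length_pyRange_one]
  · intro k h1 h2
    have hk : k < sequence.length - 1 := by
      simpa [PySem.List.length_pyRange_one] using h1
    have hkr : k < (PySem.List.pyRange 1 (sequence.length : Int) 1).length := by
      simpa using h1
    simp only [List.getElem_map, List.getElem_zip]
    rw [PySem.List.getElem_pyRange_one]
    have e1 : (1 : Int) + k - 1 = ((k : Nat) : Int) := by ring
    have e2 : (1 : Int) + k = (((k + 1 : Nat)) : Int) := by push_cast; ring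
    rw [e1, e2, PySem.List.pyGetD_natCast, PySem.List.pyGetD_natCast]
    have h3 : k < sequence.length := by omega
    have h4 : k + 1 < sequence.length := by omega
    simp [List.getD, h3, h4, List.getElem_tail]

-- ===== VERDICT (by name: the statement is the Claim_ definition above) =====
theorem lagged_iterate_spec : Claim_equal_lagged_iterate := by
  intro sequence _
  unfold Spec_lagged_iterate lagged_iterate
  rw [lagged_iterate_alt_eq_zip]
  cases sequence with
  | nil => rfl
  | cons c rest => simp [lagged_iterate_go, lagged_iterate_go_true rest c]
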